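-- pv_equiv track=rewrite | github.com/cloveric/awe-agentforge | src/awe_agentcheck/adapters/base.py | has_codex_multi_agent_flag
-- ===== SOURCE A (Python) =====
-- def has_codex_multi_agent_config_token(value: str) -> bool:
--     text = str(value or '').strip().strip('"').strip("'")
--     return text.lower().startswith('features.multi_agent=')
--
-- def has_codex_multi_agent_flag(argv: list[str]) -> bool:
--     idx = 0
--     while idx < len(argv):
--         token = str(argv[idx]).strip()
--         if token in {'--enable', '--config'}:
--             next_value = str(argv[idx + 1]).strip() if idx + 1 < len(argv) else ''
--             if token == '--enable' and next_value == 'multi_agent':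
--                 return True
--             if token == '--config' and has_codex_multi_agent_config_token(next_value):
--                 return True
--             idx += 2
--             continue
--         if token.startswith('--enable='):
--             values = [value.strip().lower() for value in token.split('=', 1)[1].split(',')]
--             if 'multi_agent' in values:
--                 return True
--         if token.startswith('--config=') and has_codex_multi_agent_config_token(token.split('=', 1)[1]):
--             return True
--         idx += 1
--     return False
-- ===== SOURCE B (Python) =====
-- def has_codex_multi_agent_config_token(value: str) -> bool:
--     text = str(value or '').strip().strip('"').strip("'")
--     return text.lower().startswith('features.multi_agent=')
--
-- def _after_eq(token: str) -> str:
--     return token.split('=', 1)[1]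
--
-- def _parse_options(argv):
--     """One scan: collect (flag, value, is_space_form) triples."""
--     opts = []
--     i = 0
--     n = len(argv)
--     while i < n:
--         tok = str(argv[i]).strip()
--         if tok in ('--enable', '--config'):
--             nxt = str(argv[i + 1]).strip() if i + 1 < n else ''
--             opts.append((tok, nxt, True))
--             i += 2
--         else:
--             if tok.startswith('--enable='):
--                 opts.append(('--enable', _after_eq(tok), False))
--             if tok.startswith('--config='):
--                 opts.append(('--config', _after_eq(tok), False))
--             i += 1
--     return opts
--
-- def _matches(flag, value, space_form):
--     if flag == '--enable':
--         if space_form: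
--             return value == 'multi_agent'
--         return 'multi_agent' in [v.strip().lower() for v in value.split(',')]
--     return has_codex_multi_agent_config_token(value)
--
-- def has_codex_multi_agent_flag(argv: list) -> bool:
--     return any(_matches(f, v, s) for f, v, s in _parse_options(argv))
-- ===== Notes on version B (the rewrite author's own statement) =====
-- stated objective: alternative
-- what changed: A's single stateful while-loop that tests and short-circuits in place is replaced by a two-phase decomposition: one scan parses argv into a list of (flag, value, form) option triples, then a separate any-pass applies the per-form matching rule.
import Mathlib
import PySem

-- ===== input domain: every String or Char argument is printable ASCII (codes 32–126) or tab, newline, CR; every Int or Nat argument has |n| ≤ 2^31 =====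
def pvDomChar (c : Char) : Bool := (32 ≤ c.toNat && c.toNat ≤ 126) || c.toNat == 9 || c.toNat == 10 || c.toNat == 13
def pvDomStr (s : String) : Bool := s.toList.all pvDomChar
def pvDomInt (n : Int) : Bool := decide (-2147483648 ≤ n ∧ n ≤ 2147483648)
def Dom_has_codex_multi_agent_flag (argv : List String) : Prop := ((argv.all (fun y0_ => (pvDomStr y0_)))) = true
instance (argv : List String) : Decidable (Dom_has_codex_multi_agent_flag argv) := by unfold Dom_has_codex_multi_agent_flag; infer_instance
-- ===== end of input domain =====

-- B re-decomposes A's single stateful while-loop into a parse pass building a list of (flag, value, form) options followed by an `any` over a per-option matching predicate; objective: alternative (same cost, no mutation).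

-- ===== PORT A =====
-- `str(value or '')` is the identity on a str argument (empty string stays empty)
def has_codex_multi_agent_config_token (value : String) : Bool :=
  let text := PySem.Str.stripChars (PySem.Str.stripChars (PySem.Str.strip value) "\"") "'"
  PySem.Str.startswith (PySem.Str.lower text) "features.multi_agent="

-- the while-loop of A: recursion on the remaining suffix argv[idx:]; `idx += 2` = dropping two elements
def hasFlagGoA : List String → Bool
  | [] => false
  | t :: rest =>
      let token := PySem.Str.strip t
      if token == "--enable" || token == "--config" then
        let next_value := match rest with
          | [] => ""
          | nx :: _ => PySem.Str.strip nx
        if token == "--enable" && next_value == "multi_agent" then true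
        else if token == "--config" && has_codex_multi_agent_config_token next_value then true
        else hasFlagGoA rest.tail
      else
        if PySem.Str.startswith token "--enable=" &&
            (((PySem.Str.split? ((((PySem.Str.splitMax? token "=" 1).getD [])[1]?).getD "") ",").getD []).map
              (fun v => PySem.Str.lower (PySem.Str.strip v))).contains "multi_agent" then true
        else if PySem.Str.startswith token "--config=" &&
            has_codex_multi_agent_config_token ((((PySem.Str.splitMax? token "=" 1).getD [])[1]?).getD "") then true
        else hasFlagGoA rest
termination_by l => l.length
decreasing_by all_goals (simp [List.length_tail]; try omega)

def has_codex_multi_agent_flag (argv : List String) : Bool := hasFlagGoA argv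

-- ===== PORT B =====
def pvAfterEq (token : String) : String :=
  ((((PySem.Str.splitMax? token "=" 1).getD [])[1]?).getD "")

-- phase 1 of B: one scan building the parsed-option triples (flag, value, is_space_form)
def pvParseOptions : List String → List (String × String × Bool)
  | [] => []
  | t :: rest =>
      let tok := PySem.Str.strip t
      if tok == "--enable" || tok == "--config" then
        let nxt := match rest with
          | [] => ""
          | nx :: _ => PySem.Str.strip nx
        (tok, nxt, true) :: pvParseOptions rest.tail
      else
        (if PySem.Str.startswith tok "--enable=" then [("--enable", pvAfterEq tok, false)] else []) ++
        (if PySem.Str.startswith tok "--config=" then [("--config", pvAfterEq tok, false)] else []) ++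
        pvParseOptions rest
termination_by l => l.length
decreasing_by all_goals (simp [List.length_tail]; try omega)

-- phase 2 of B: the per-option matching rule
def pvMatches (o : String × String × Bool) : Bool :=
  if o.1 == "--enable" then
    if o.2.2 then o.2.1 == "multi_agent"
    else (((PySem.Str.split? o.2.1 ",").getD []).map (fun v => PySem.Str.lower (PySem.Str.strip v))).contains "multi_agent"
  else has_codex_multi_agent_config_token o.2.1

def has_codex_multi_agent_flag_alt (argv : List String) : Bool :=
  (pvParseOptions argv).any pvMatches

-- ===== PRECONDITION & SPEC =====
def Spec_has_codex_multi_agent_flag (argv : List String) (out : Bool) : Prop := out = has_codex_multi_agent_flag_alt argv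
instance (argv : List String) (out : Bool) : Decidable (Spec_has_codex_multi_agent_flag argv out) := by unfold Spec_has_codex_multi_agent_flag; infer_instance

-- ===== CLAIM (what is proved, stated in full; the proofs are below) =====
def Claim_equal_has_codex_multi_agent_flag : Prop := ∀ (argv : List String), Dom_has_codex_multi_agent_flag argv → Spec_has_codex_multi_agent_flag argv (has_codex_multi_agent_flag argv)

-- ===== LEMMAS AND PROOFS =====
lemma goA_eq_any (n : Nat) : ∀ (l : List String), l.length ≤ n → hasFlagGoA l = (pvParseOptions l).any pvMatches := by
  induction n with
  | zero =>
      intro l hl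
      have : l = [] := List.length_eq_zero_iff.mp (Nat.le_zero.mp hl)
      subst this; simp [hasFlagGoA, pvParseOptions]
  | succ n ih =>
      intro l hl
      cases l with
      | nil => simp [hasFlagGoA, pvParseOptions]
      | cons t rest =>
          rw [hasFlagGoA.eq_def, pvParseOptions.eq_def]
          simp only [List.length_cons, Nat.succ_le_succ_iff] at hl
          have htail : rest.tail.length ≤ n := by rw [List.length_tail]; omega
          cases hen : (PySem.Str.strip t == "--enable") with
          | true =>
              have hne : (PySem.Str.strip t == "--config") = false := by
                have h := eq_of_beq hen
                simp [h]
              simp [hen, hne, pvMatches, ih rest.tail htail, Bool.beq_eq_decide_eq]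
          | false =>
              cases hcf : (PySem.Str.strip t == "--config") with
              | true => simp [hen, hcf, pvMatches, ih rest.tail htail]
              | false =>
                  cases h1 : (PySem.Str.startswith (PySem.Str.strip t) "--enable=") <;>
                    cases h2 : (PySem.Str.startswith (PySem.Str.strip t) "--config=") <;>
                      simp at h1 h2 <;>
                        simp [hen, hcf, h1, h2, pvMatches, pvAfterEq, ih rest hl]

-- ===== VERDICT (by name: the statement is the Claim_ definition above) =====
theorem has_codex_multi_agent_flag_spec : Claim_equal_has_codex_multi_agent_flag := by
  intro argv _
  unfold Spec_has_codex_multi_agent_flag has_codex_multi_agent_flag has_codex_multi_agent_flag_alt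
  exact goA_eq_any argv.length argv le_rfl
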